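-- pv_equiv track=rewrite | github.com/PurshottamKumar07/AI-based-code-optimizer | main.py | _clean_pdf_text
-- ===== SOURCE A (Python) =====
-- def _clean_pdf_text(raw):
--     """
--     Lightly clean extracted PDF text so it loads nicely into the editor.
--     - Remove form-feed characters
--     - Normalise Windows line endings
--     - Strip trailing whitespace per line
--     - Remove completely blank duplicate lines (keep one blank line as separator)
--     """
--     text = raw.replace("\r\n", "\n").replace("\r", "\n").replace("\x0c", "\n")
--     lines = text.split("\n")
--     cleaned, prev_blank = [], False
--     for line in lines:
--         line = line.rstrip()
--         is_blank = (line == "")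
--         if is_blank and prev_blank:
--             continue          # collapse consecutive blank lines into one
--         cleaned.append(line)
--         prev_blank = is_blank
--     return "\n".join(cleaned).strip()
-- ===== SOURCE B (Python) =====
-- def _clean_pdf_text(raw):
--     # Alternative: group non-blank lines into paragraphs and rejoin with a single
--     # blank line, instead of a prev_blank state machine over kept lines.
--     norm = raw.replace("\r\n", "\n").replace("\r", "\n").replace("\x0c", "\n")
--     paras, cur = [], []
--     for ln in norm.split("\n"):
--         ln = ln.rstrip()
--         if ln:
--             cur.append(ln)
--         elif cur:
--             paras.append(cur)
--             cur = []
--     if cur: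
--         paras.append(cur)
--     return "\n\n".join("\n".join(p) for p in paras).strip()
-- ===== Notes on version B (the rewrite author's own statement) =====
-- stated objective: alternative
-- what changed: B splits the normalised text into paragraphs of non-blank (rstripped) lines and rejoins the paragraphs with a single blank-line separator, replacing A's prev_blank state machine that filters duplicate blank lines out of a flat kept-lines list.
import Mathlib
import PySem

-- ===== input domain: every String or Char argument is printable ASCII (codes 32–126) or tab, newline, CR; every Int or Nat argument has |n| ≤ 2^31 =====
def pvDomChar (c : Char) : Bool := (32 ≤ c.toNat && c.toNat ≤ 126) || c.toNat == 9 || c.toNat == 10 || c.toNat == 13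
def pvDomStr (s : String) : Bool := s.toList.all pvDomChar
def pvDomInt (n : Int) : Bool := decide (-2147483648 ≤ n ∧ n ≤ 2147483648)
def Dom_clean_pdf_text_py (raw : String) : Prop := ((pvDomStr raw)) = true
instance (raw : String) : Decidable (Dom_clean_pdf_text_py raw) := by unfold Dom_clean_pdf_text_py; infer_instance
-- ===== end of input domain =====

-- B groups non-blank lines into paragraphs and rejoins them with a blank-line separator,
-- instead of A's prev_blank state machine over kept lines; objective: alternative (same cost).

-- ===== PORT A =====
def clean_pdf_text_py (raw : String) : String :=
  let text := PySem.Str.replace (PySem.Str.replace (PySem.Str.replace raw "\r\n" "\n") "\r" "\n") "\x0c" "\n"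
  let lines := (PySem.Str.split? text "\n").getD []   -- sep = "\n" ≠ "", so split? is never none
  let st := lines.foldl (fun (st : List String × Bool) line =>
    let line := PySem.Str.rstrip line
    let is_blank := line == ""
    if is_blank && st.2 then st
    else (st.1 ++ [line], is_blank)) ([], false)
  PySem.Str.strip (PySem.Str.join "\n" st.1)

-- ===== PORT B =====
def clean_pdf_text_py_alt (raw : String) : String :=
  let norm := PySem.Str.replace (PySem.Str.replace (PySem.Str.replace raw "\r\n" "\n") "\r" "\n") "\x0c" "\n"
  let st := ((PySem.Str.split? norm "\n").getD []).foldl   -- sep = "\n" ≠ "", so split? is never none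
    (fun (st : List (List String) × List String) ln =>
      let ln := PySem.Str.rstrip ln
      if ln != "" then (st.1, st.2 ++ [ln])
      else if st.2 != [] then (st.1 ++ [st.2], [])
      else st) ([], [])
  let paras := if st.2 != [] then st.1 ++ [st.2] else st.1
  PySem.Str.strip (PySem.Str.join "\n\n" (paras.map (fun p => PySem.Str.join "\n" p)))

-- ===== PRECONDITION & SPEC =====
def Spec_clean_pdf_text_py (raw : String) (out : String) : Prop := out = clean_pdf_text_py_alt raw
instance (raw : String) (out : String) : Decidable (Spec_clean_pdf_text_py raw out) := by unfold Spec_clean_pdf_text_py; infer_instance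

-- ===== CLAIM (what is proved, stated in full; the proofs are below) =====
def Claim_equal_clean_pdf_text_py : Prop := ∀ (raw : String), Dom_clean_pdf_text_py raw → Spec_clean_pdf_text_py raw (clean_pdf_text_py raw)

-- ===== LEMMAS AND PROOFS =====
def pvColR : Bool → List (List Char) → List (List Char)
  | _, [] => []
  | pb, m :: r => if m = [] ∧ pb = true then pvColR pb r else m :: pvColR (decide (m = [])) r

def pvGrpR : List (List Char) → List (List Char) → List (List (List Char))
  | cur, [] => if cur = [] then [] else [cur]
  | cur, m :: r =>
    if m ≠ [] then pvGrpR (cur ++ [m]) r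
    else if cur ≠ [] then cur :: pvGrpR [] r
    else pvGrpR [] r

lemma pv_grp_dropBlanks (r : List (List Char)) :
    pvGrpR [] r = pvGrpR [] (r.dropWhile (fun m => decide (m = []))) := by
  induction r with
  | nil => rfl
  | cons m r ih =>
    by_cases hm : m = []
    · subst hm; simpa [pvGrpR] using ih
    · simp [pvGrpR, hm]

lemma pv_grp_flush (r : List (List Char)) (cur : List (List Char)) (h : cur ≠ []) :
    pvGrpR cur r = (cur ++ r.takeWhile (fun m => decide (m ≠ []))) ::
      pvGrpR [] (r.dropWhile (fun m => decide (m ≠ []))) := by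
  induction r generalizing cur with
  | nil => simp [pvGrpR, h]
  | cons m r ih =>
    by_cases hm : m = []
    · subst hm
      simp [pvGrpR, h]
    · simp [pvGrpR, hm, ih (cur ++ [m]) (by simp)]

lemma pv_col_run (run rest : List (List Char)) (h : ∀ x ∈ run, x ≠ []) :
    pvColR false (run ++ rest) = run ++ pvColR false rest := by
  induction run with
  | nil => simp
  | cons x run ih =>
    have hx : x ≠ [] := h x (by simp)
    simp [pvColR, hx, ih (fun y hy => h y (by simp [hy]))]

lemma pv_col_true (r : List (List Char)) :
    pvColR true r = pvColR false (r.dropWhile (fun m => decide (m = []))) := by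
  induction r with
  | nil => rfl
  | cons m r ih =>
    by_cases hm : m = []
    · subst hm; simpa [pvColR] using ih
    · simp [pvColR, hm]
lemma pv_join_append (sep : List Char) (xs ys : List (List Char)) (hx : xs ≠ []) (hy : ys ≠ []) :
    PySem.Chars.join sep (xs ++ ys) = PySem.Chars.join sep xs ++ sep ++ PySem.Chars.join sep ys := by
  induction xs with
  | nil => exact absurd rfl hx
  | cons x xs ih =>
    cases xs with
    | nil =>
      cases ys with
      | nil => exact absurd rfl hy
      | cons y ys' => simp [PySem.Chars.join_cons_cons, PySem.Chars.join_singleton]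
    | cons x2 xs' =>
      have h1 := ih (by simp)
      rw [List.cons_append] at h1
      simp only [List.cons_append, PySem.Chars.join_cons_cons, h1]
      simp [List.append_assoc]


theorem pv_decomp_head (ms : List (List Char)) (h : ∀ x ∈ ms.head?, x ≠ []) :
    ∃ l : Nat, PySem.Chars.join ['\n'] (pvColR false ms)
      = PySem.Chars.join ['\n', '\n'] ((pvGrpR [] ms).map (PySem.Chars.join ['\n']))
        ++ List.replicate l '\n' := by
  match ms with
  | [] => exact ⟨0, by simp [pvColR, pvGrpR, PySem.Chars.join_nil]⟩
  | m :: tail =>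
    have hm : m ≠ [] := h m (by simp)
    have hsplit : m :: tail
        = (m :: tail.takeWhile (fun x => decide (x ≠ [])))
          ++ tail.dropWhile (fun x => decide (x ≠ [])) := by
      simp [List.takeWhile_append_dropWhile]
    have hrun : ∀ x ∈ (m :: tail.takeWhile (fun x => decide (x ≠ []))), x ≠ [] := by
      intro x hx
      rcases List.mem_cons.mp hx with hx | hx
      · exact hx ▸ hm
      · simpa using List.mem_takeWhile_imp hx
    have hcol : pvColR false (m :: tail)
        = (m :: tail.takeWhile (fun x => decide (x ≠ [])))
          ++ pvColR false (tail.dropWhile (fun x => decide (x ≠ []))) := by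
      conv_lhs => rw [hsplit]
      exact pv_col_run _ _ hrun
    have hgrp : pvGrpR [] (m :: tail)
        = (m :: tail.takeWhile (fun x => decide (x ≠ [])))
          :: pvGrpR [] (tail.dropWhile (fun x => decide (x ≠ []))) := by
      have h1 : pvGrpR [] (m :: tail) = pvGrpR [m] tail := by simp [pvGrpR, hm]
      rw [h1, pv_grp_flush tail [m] (by simp)]
      simp
    rcases hE2 : tail.dropWhile (fun x => decide (x ≠ [])) with _ | ⟨b, r2⟩
    · refine ⟨0, ?_⟩
      rw [hcol, hgrp, hE2]
      simp [pvColR, pvGrpR, PySem.Chars.join_singleton]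
    · -- the rest starts with a blank line
      have hb : b = [] := by
        have w : tail.dropWhile (fun x => decide (x ≠ [])) ≠ [] := by rw [hE2]; simp
        have hhd := List.head_dropWhile_not (fun x => decide (x ≠ [])) w
        simp only [hE2, List.head_cons] at hhd
        simpa using hhd
      subst hb
      have hcol2 : pvColR false ([] :: r2)
          = [] :: pvColR false (r2.dropWhile (fun x => decide (x = []))) := by
        simp [pvColR, pv_col_true]
      have hgrp2 : pvGrpR [] (([] : List Char) :: r2)
          = pvGrpR [] (r2.dropWhile (fun x => decide (x = []))) := by
        have h1 : pvGrpR [] (([] : List Char) :: r2) = pvGrpR [] r2 := by simp [pvGrpR]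
        rw [h1, pv_grp_dropBlanks]
      have hhead'' : ∀ x ∈ (r2.dropWhile (fun x => decide (x = []))).head?, x ≠ [] := by
        intro x hx
        rcases hE4 : r2.dropWhile (fun x => decide (x = [])) with _ | ⟨c, r3⟩
        · rw [hE4] at hx; simp at hx
        · rw [hE4] at hx
          simp only [List.head?_cons, Option.mem_def, Option.some.injEq] at hx
          subst hx
          have w : r2.dropWhile (fun x => decide (x = [])) ≠ [] := by rw [hE4]; simp
          have hhd := List.head_dropWhile_not (fun x => decide (x = [])) w
          simp only [hE4, List.head_cons] at hhd
          simpa using hhd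
      have hlen : (r2.dropWhile (fun x => decide (x = []))).length < (m :: tail).length := by
        have h1 := List.length_dropWhile_le (fun x => decide (x = [])) r2
        have h2 := List.length_dropWhile_le (fun x => decide (x ≠ [])) tail
        have h3 := congrArg List.length hE2
        simp only [List.length_cons] at h3 ⊢
        omega
      obtain ⟨l', ihl⟩ := pv_decomp_head (r2.dropWhile (fun x => decide (x = []))) hhead''
      rcases hE3 : r2.dropWhile (fun x => decide (x = [])) with _ | ⟨c, r3⟩
      · -- nothing after the blank run: one trailing newline
        rw [hE3] at hcol2 hgrp2
        rw [show pvColR false ([] : List (List Char)) = [] by simp [pvColR]] at hcol2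
        rw [show pvGrpR [] ([] : List (List Char)) = [] by simp [pvGrpR]] at hgrp2
        refine ⟨1, ?_⟩
        rw [hcol, hgrp, hE2, hcol2, hgrp2]
        rw [pv_join_append ['\n'] _ [[]] (by simp) (by simp)]
        simp [PySem.Chars.join_singleton]
      · -- a further paragraph follows
        have hc : c ≠ [] := hhead'' c (by rw [hE3]; simp)
        have hcolc : pvColR false (c :: r3) = c :: pvColR (decide (c = [])) r3 := by
          simp [pvColR, hc]
        obtain ⟨g1, gs, hG⟩ : ∃ g1 gs, pvGrpR [] (c :: r3) = g1 :: gs := by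
          have h1 : pvGrpR [] (c :: r3) = pvGrpR [c] r3 := by simp [pvGrpR, hc]
          exact ⟨_, _, by rw [h1, pv_grp_flush r3 [c] (by simp)]⟩
        rw [hE3] at ihl hcol2 hgrp2
        rw [hcolc, hG] at ihl
        refine ⟨l', ?_⟩
        rw [hcol, hgrp, hE2, hcol2, hgrp2, hG, hcolc]
        rw [pv_join_append ['\n'] _ ([] :: c :: pvColR (decide (c = [])) r3) (by simp) (by simp)]
        rw [PySem.Chars.join_cons_cons, ihl]
        simp [PySem.Chars.join_cons_cons, List.append_assoc]
termination_by ms.length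
decreasing_by simpa using hlen

lemma pv_decomp (ms : List (List Char)) :
    ∃ k l : Nat, PySem.Chars.join ['\n'] (pvColR false ms)
      = List.replicate k '\n'
        ++ PySem.Chars.join ['\n', '\n'] ((pvGrpR [] ms).map (PySem.Chars.join ['\n']))
        ++ List.replicate l '\n' := by
  rcases ms with _ | ⟨m, r⟩
  · exact ⟨0, 0, by simp [pvColR, pvGrpR, PySem.Chars.join_nil]⟩
  · by_cases hm : m = []
    · subst hm
      have hcol2 : pvColR false ([] :: r)
          = [] :: pvColR false (r.dropWhile (fun x => decide (x = []))) := by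
        simp [pvColR, pv_col_true]
      have hgrp2 : pvGrpR [] (([] : List Char) :: r)
          = pvGrpR [] (r.dropWhile (fun x => decide (x = []))) := by
        have h1 : pvGrpR [] (([] : List Char) :: r) = pvGrpR [] r := by simp [pvGrpR]
        rw [h1, pv_grp_dropBlanks]
      have hhead : ∀ x ∈ (r.dropWhile (fun x => decide (x = []))).head?, x ≠ [] := by
        intro x hx
        rcases hE : r.dropWhile (fun x => decide (x = [])) with _ | ⟨c, r3⟩
        · rw [hE] at hx; simp at hx
        · rw [hE] at hx
          simp only [List.head?_cons, Option.mem_def, Option.some.injEq] at hx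
          subst hx
          have w : r.dropWhile (fun x => decide (x = [])) ≠ [] := by rw [hE]; simp
          have hhd := List.head_dropWhile_not (fun x => decide (x = [])) w
          simp only [hE, List.head_cons] at hhd
          simpa using hhd
      obtain ⟨l, hl⟩ := pv_decomp_head _ hhead
      rcases hE : r.dropWhile (fun x => decide (x = [])) with _ | ⟨c, r3⟩
      · refine ⟨0, 0, ?_⟩
        rw [hE] at hcol2 hgrp2
        rw [hcol2, hgrp2]
        simp [pvColR, pvGrpR, PySem.Chars.join_singleton, PySem.Chars.join_nil]
      · refine ⟨1, l, ?_⟩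
        rw [hE] at hcol2 hgrp2 hl
        have hc : c ≠ [] := hhead c (by rw [hE]; simp)
        have hX : pvColR false (c :: r3) = c :: pvColR (decide (c = [])) r3 := by
          simp [pvColR, hc]
        rw [hX] at hl
        rw [hcol2, hX, PySem.Chars.join_cons_cons, hl, hgrp2]
        simp
    · have hhead : ∀ x ∈ (m :: r).head?, x ≠ [] := by
        intro x hx
        simp only [List.head?_cons, Option.mem_def, Option.some.injEq] at hx
        exact hx ▸ hm
      obtain ⟨l, hl⟩ := pv_decomp_head _ hhead
      exact ⟨0, l, by simpa using hl⟩

lemma pv_str_beq_empty (s : String) : (s == "") = decide (s.toList = []) := by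
  rw [Bool.eq_iff_iff]
  simp [String.toList_eq_nil_iff]

lemma pv_foldA (ls : List String) (acc : List String) (pb : Bool) :
    ((ls.foldl (fun (st : List String × Bool) line =>
      let line := PySem.Str.rstrip line
      let is_blank := line == ""
      if is_blank && st.2 then st
      else (st.1 ++ [line], is_blank)) (acc, pb)).1).map String.toList
    = acc.map String.toList ++ pvColR pb (ls.map (fun s => PySem.Chars.rstrip s.toList)) := by
  induction ls generalizing acc pb with
  | nil => simp [pvColR]
  | cons line ls ih =>
    have hbeq : (PySem.Str.rstrip line == "") = decide (PySem.Chars.rstrip line.toList = []) := by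
      rw [pv_str_beq_empty, PySem.Str.toList_rstrip]
    simp only [List.foldl_cons, List.map_cons]
    by_cases hb : PySem.Chars.rstrip line.toList = []
    · cases pb
      · simp only [hbeq, hb, decide_true, Bool.and_false, if_neg Bool.false_ne_true]
        rw [ih]
        simp [pvColR, hb, PySem.Str.toList_rstrip]
      · simp only [hbeq, hb, decide_true, Bool.and_true]
        rw [ih]
        simp [pvColR]
    · simp only [hbeq, hb, decide_false, Bool.false_and, if_neg Bool.false_ne_true]
      rw [ih]
      simp [pvColR, hb, PySem.Str.toList_rstrip]

lemma pv_foldB (ls : List String) (accP : List (List String)) (accC : List String) :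
    (let st := ls.foldl (fun (st : List (List String) × List String) ln =>
        let ln := PySem.Str.rstrip ln
        if ln != "" then (st.1, st.2 ++ [ln])
        else if st.2 != [] then (st.1 ++ [st.2], [])
        else st) (accP, accC);
      (if st.2 != [] then st.1 ++ [st.2] else st.1)).map (List.map String.toList)
    = accP.map (List.map String.toList)
      ++ pvGrpR (accC.map String.toList) (ls.map (fun s => PySem.Chars.rstrip s.toList)) := by
  induction ls generalizing accP accC with
  | nil =>
    by_cases hc : accC = []
    · subst hc; simp [pvGrpR]
    · have : (accC != []) = true := by simp [hc]
      simp [pvGrpR, this, hc]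
  | cons ln ls ih =>
    have hbeq : (PySem.Str.rstrip ln != "") = !decide (PySem.Chars.rstrip ln.toList = []) := by
      rw [bne, pv_str_beq_empty, PySem.Str.toList_rstrip]
    simp only [List.foldl_cons, List.map_cons]
    by_cases hb : PySem.Chars.rstrip ln.toList = []
    · -- blank line
      by_cases hc : accC = []
      · subst hc
        simp only [hbeq, hb, decide_true, Bool.not_true, if_neg Bool.false_ne_true]
        simp only [show (([] : List String) != []) = false from rfl, if_neg Bool.false_ne_true]
        rw [ih]
        simp [pvGrpR]
      · have hcb : (accC != []) = true := by simp [hc]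
        simp only [hbeq, hb, decide_true, Bool.not_true, if_neg Bool.false_ne_true, hcb]
        rw [ih]
        have hmc : accC.map String.toList ≠ [] := by simpa using hc
        simp [pvGrpR, hmc, List.map_append]
    · simp only [hbeq, hb, decide_false, Bool.not_false]
      rw [ih]
      simp [pvGrpR, hb, PySem.Str.toList_rstrip, List.map_append]


lemma pv_dropWhile_replicate (p : Char → Bool) (a : Char) (h : p a = true) (k : Nat) (xs : List Char) :
    List.dropWhile p (List.replicate k a ++ xs) = List.dropWhile p xs := by
  induction k with
  | zero => simp
  | succ n ih => simp [List.replicate_succ, h, ih]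

lemma pv_rstrip_pad (y : List Char) (l : Nat) :
    PySem.Chars.rstrip (y ++ List.replicate l '\n') = PySem.Chars.rstrip y := by
  simp only [PySem.Chars.rstrip, List.reverse_append, List.reverse_replicate]
  rw [pv_dropWhile_replicate _ _ (by decide)]

lemma pv_strip_pad (cs : List Char) (k l : Nat) :
    PySem.Chars.strip (List.replicate k '\n' ++ cs ++ List.replicate l '\n') = PySem.Chars.strip cs := by
  simp only [PySem.Chars.strip, PySem.Chars.lstrip]
  rw [List.append_assoc, pv_dropWhile_replicate _ _ (by decide), List.dropWhile_append]
  by_cases h : (List.dropWhile PySem.Chars.isspace cs).isEmpty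
  · simp only [h, if_pos]
    rw [show List.replicate l '\n' = List.replicate l '\n' ++ [] by simp,
        pv_dropWhile_replicate _ _ (by decide)]
    simp only [List.dropWhile_nil]
    rw [List.isEmpty_iff] at h
    rw [h]
  · simp only [h, if_neg, Bool.false_eq_true, not_false_iff]
    exact pv_rstrip_pad _ _

-- the two ports agree for ANY list of lines (both rstrip each line; A collapses
-- blank runs keeping one, B groups the non-blank lines into paragraphs)
lemma pv_main (ls : List String) :
    PySem.Str.strip (PySem.Str.join "\n"
      (ls.foldl (fun (st : List String × Bool) line =>
        let line := PySem.Str.rstrip line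
        let is_blank := line == ""
        if is_blank && st.2 then st
        else (st.1 ++ [line], is_blank)) ([], false)).1)
    = PySem.Str.strip (PySem.Str.join "\n\n"
      ((let st := ls.foldl (fun (st : List (List String) × List String) ln =>
          let ln := PySem.Str.rstrip ln
          if ln != "" then (st.1, st.2 ++ [ln])
          else if st.2 != [] then (st.1 ++ [st.2], [])
          else st) ([], []);
        (if st.2 != [] then st.1 ++ [st.2] else st.1)).map (fun p => PySem.Str.join "\n" p))) := by
  rw [String.ext_iff, PySem.Str.toList_strip, PySem.Str.toList_strip,
      PySem.Str.toList_join, PySem.Str.toList_join]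
  rw [show ("\n" : String).toList = ['\n'] from by decide,
      show ("\n\n" : String).toList = ['\n', '\n'] from by decide]
  rw [pv_foldA ls [] false]
  have hB := pv_foldB ls [] []
  simp only [List.map_nil, List.nil_append] at hB ⊢
  rw [List.map_map]
  rw [show ((fun s => s.toList) ∘ fun p => PySem.Str.join "\n" p)
        = (fun p : List String => (PySem.Str.join "\n" p).toList) from rfl]
  simp only [PySem.Str.toList_join, show ("\n" : String).toList = ['\n'] from by decide]
  rw [show (fun p : List String => PySem.Chars.join ['\n'] (List.map (fun s => String.toList s) p))
        = (PySem.Chars.join ['\n']) ∘ (List.map String.toList) from rfl]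
  rw [← List.map_map, hB]
  obtain ⟨k, l, hd⟩ := pv_decomp (ls.map (fun s => PySem.Chars.rstrip s.toList))
  rw [hd, pv_strip_pad]

-- ===== VERDICT (by name: the statement is the Claim_ definition above) =====
theorem clean_pdf_text_py_spec : Claim_equal_clean_pdf_text_py := by
  intro raw _
  unfold Spec_clean_pdf_text_py clean_pdf_text_py clean_pdf_text_py_alt
  exact pv_main _
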